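-- pv_equiv track=rewrite | github.com/IBoutbaoucht/Codeforces-Problems | X sums.py | get_left_diagonals
-- ===== SOURCE A (Python) =====
-- def get_left_diagonals(matrix):
--     diagonals = {}
--     rows = len(matrix)
--     cols = len(matrix[0]) if rows > 0 else 0
--
--     for row in range(rows):
--         for col in range(cols):
--             diff = row - col
--             if diff not in diagonals:
--                 diagonals[diff] = []
--             diagonals[diff].append(matrix[row][col])
--
--     return ([sum(diagonals[key]) for key in sorted(diagonals.keys())])
-- ===== SOURCE B (Python) =====
-- def get_left_diagonals(matrix):
--     rows = len(matrix)
--     cols = len(matrix[0]) if rows > 0 else 0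
--     if rows == 0 or cols == 0:
--         return []
--     result = []
--     for diff in range(-(cols - 1), rows):
--         s = 0
--         for row in range(max(0, diff), min(rows, diff + cols)):
--             s += matrix[row][row - diff]
--         result.append(s)
--     return result
-- ===== Notes on version B (the rewrite author's own statement) =====
-- stated objective: simpler
-- what changed: B drops the dict-grouping and the final sort entirely: it enumerates the diagonal indices diff = -(cols-1)..rows-1 in order (already ascending) and accumulates each diagonal's sum directly from the matrix, instead of A's build-lists-in-a-dict then sorted(keys) then per-key sum.
import Mathlib
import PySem

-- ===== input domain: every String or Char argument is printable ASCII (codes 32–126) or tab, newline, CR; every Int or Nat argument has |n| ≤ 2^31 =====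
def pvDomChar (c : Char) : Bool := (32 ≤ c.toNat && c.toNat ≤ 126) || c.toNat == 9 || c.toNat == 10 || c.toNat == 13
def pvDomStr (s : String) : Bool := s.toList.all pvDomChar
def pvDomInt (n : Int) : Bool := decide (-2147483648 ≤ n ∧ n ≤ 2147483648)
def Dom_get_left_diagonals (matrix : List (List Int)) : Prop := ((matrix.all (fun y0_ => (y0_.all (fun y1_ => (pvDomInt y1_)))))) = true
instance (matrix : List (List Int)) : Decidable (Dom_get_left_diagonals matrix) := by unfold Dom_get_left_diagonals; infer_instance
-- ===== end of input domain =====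

-- B replaces A's group-into-a-dict-then-sort-the-keys with a direct pass over the diagonal
-- indices in ascending order, summing each diagonal straight from the matrix (objective: simpler).

-- ===== PORT A =====
def get_left_diagonals (matrix : List (List Int)) : List Int :=
  let rows : Int := PySem.List.len matrix
  let cols : Int := if rows > 0 then PySem.List.len (PySem.List.pyGetD matrix 0 []) else 0
  let diagonals : PySem.Dict Int (List Int) :=
    (PySem.List.pyRange 0 rows 1).foldl (fun d row =>
      (PySem.List.pyRange 0 cols 1).foldl (fun d col =>
        let diff := row - col
        -- 'if diff not in diagonals: diagonals[diff] = []'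
        let d := if d.contains diff = false then d.insert diff [] else d
        -- 'diagonals[diff].append(matrix[row][col])' ; matrix[row][col] is pyGetD (in range under Pre_)
        d.modify diff [] (fun l => l ++ [PySem.List.pyGetD (PySem.List.pyGetD matrix row []) col 0])) d)
      PySem.Dict.empty
  (PySem.List.sorted diagonals.keys (fun k => k)).map (fun k => (diagonals.getD k []).sum)

-- ===== PORT B =====
def get_left_diagonals_alt (matrix : List (List Int)) : List Int :=
  let rows : Int := PySem.List.len matrix
  let cols : Int := if rows > 0 then PySem.List.len (PySem.List.pyGetD matrix 0 []) else 0
  if rows = 0 ∨ cols = 0 then []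
  else
    (PySem.List.pyRange (-(cols - 1)) rows 1).foldl (fun res diff =>
      res ++ [(PySem.List.pyRange (max 0 diff) (min rows (diff + cols)) 1).foldl
        (fun s row => s + PySem.List.pyGetD (PySem.List.pyGetD matrix row []) (row - diff) 0) 0]) []

-- ===== PRECONDITION & SPEC =====
-- Pre_ excludes ragged matrices in which some row is shorter than the first row: there
-- Python A (and Python B) raise IndexError while indexing matrix[row][col] with col < len(matrix[0]).
def Pre_get_left_diagonals (matrix : List (List Int)) : Prop :=
  ∀ r ∈ matrix, (matrix.headD []).length ≤ r.length
instance (matrix : List (List Int)) : Decidable (Pre_get_left_diagonals matrix) := by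
  unfold Pre_get_left_diagonals; infer_instance

def pvWitness_get_left_diagonals : List (List Int) := [[1, 2], [3, 4]]

def Spec_get_left_diagonals (matrix : List (List Int)) (out : List Int) : Prop := out = get_left_diagonals_alt matrix
instance (matrix : List (List Int)) (out : List Int) : Decidable (Spec_get_left_diagonals matrix out) := by unfold Spec_get_left_diagonals; infer_instance

-- ===== CLAIM (what is proved, stated in full; the proofs are below) =====
def Claim_equal_get_left_diagonals : Prop := ∀ (matrix : List (List Int)), Dom_get_left_diagonals matrix → Pre_get_left_diagonals matrix → Spec_get_left_diagonals matrix (get_left_diagonals matrix)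

-- ===== LEMMAS AND PROOFS =====

-- matrix[row][col] as both ports compute it
def pvVal (matrix : List (List Int)) (row col : Int) : Int :=
  PySem.List.pyGetD (PySem.List.pyGetD matrix row []) col 0

-- the (diff, value) pairs A's double loop feeds into the dict, in loop order
def pvPairs (matrix : List (List Int)) (R C : Int) : List (Int × Int) :=
  (PySem.List.pyRange 0 R 1).flatMap (fun row =>
    (PySem.List.pyRange 0 C 1).map (fun col => (row - col, pvVal matrix row col)))

-- A's guarded "ensure key then append" is the plain grouping step
lemma pv_guard_modify (d : PySem.Dict Int (List Int)) (k : Int) (v : Int) :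
    ((if d.contains k = false then d.insert k [] else d).modify k [] (fun l => l ++ [v]))
      = d.modify k [] (fun l => l ++ [v]) := by
  by_cases h : d.contains k
  · simp [h]
  · simp only [Bool.not_eq_true] at h
    simp [h, PySem.Dict.modify, PySem.Dict.getD_insert_self, PySem.Dict.insert_insert_self,
      PySem.Dict.getD_of_not_contains d ([] : List Int) h]

-- A's double fold is the canonical grouping fold over pvPairs
lemma pv_dictA_eq (matrix : List (List Int)) (R C : Int) :
    ((PySem.List.pyRange 0 R 1).foldl (fun d row =>
      (PySem.List.pyRange 0 C 1).foldl (fun d col =>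
        let diff := row - col
        let d := if d.contains diff = false then d.insert diff [] else d
        d.modify diff [] (fun l => l ++ [PySem.List.pyGetD (PySem.List.pyGetD matrix row []) col 0])) d)
      PySem.Dict.empty)
    = (pvPairs matrix R C).foldl (fun d p => d.modify p.1 [] (fun l => l ++ [p.2])) PySem.Dict.empty := by
  unfold pvPairs
  rw [List.foldl_flatMap]
  apply PySem.List.foldl_congr_mem
  intro d row _
  rw [List.foldl_map]
  apply PySem.List.foldl_congr_mem
  intro d' col _
  exact pv_guard_modify d' (row - col) (pvVal matrix row col)

lemma pv_keys_canon (L : List (Int × Int)) :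
    (L.foldl (fun d p => d.modify p.1 [] (fun l => l ++ [p.2])) PySem.Dict.empty).keys
      = PySem.Set.ofList (L.map Prod.fst) := by
  rw [PySem.Dict.keys_foldl_modify_key L Prod.fst [] (fun _ p l => l ++ [p.2]) PySem.Dict.empty]
  rw [PySem.Dict.keys_empty]
  rfl

lemma pv_getD_canon (L : List (Int × Int)) (k : Int) :
    (L.foldl (fun d p => d.modify p.1 [] (fun l => l ++ [p.2])) PySem.Dict.empty).getD k []
      = (L.filter (fun p => p.1 == k)).map (fun p => p.2) := by
  rw [PySem.Dict.getD_foldl_modify_append, PySem.Dict.getD_empty]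
  simp

lemma pv_mem_fst_pairs (matrix : List (List Int)) (R C k : Int) :
    k ∈ (pvPairs matrix R C).map Prod.fst ↔ (0 < R ∧ 0 < C ∧ -(C - 1) ≤ k ∧ k < R) := by
  unfold pvPairs
  simp only [List.map_flatMap, List.map_map, List.mem_flatMap, List.mem_map,
    PySem.List.mem_pyRange_one, Function.comp]
  constructor
  · rintro ⟨row, ⟨h0, h1⟩, col, ⟨h2, h3⟩, rfl⟩
    omega
  · rintro ⟨hR, hC, hk1, hk2⟩
    exact ⟨max 0 k, by omega, max 0 k - k, by omega, by omega⟩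

lemma pv_sorted_keys (matrix : List (List Int)) (R C : Int) (hR : 0 < R) (hC : 0 < C) :
    PySem.List.sorted (PySem.Set.ofList ((pvPairs matrix R C).map Prod.fst)) (fun k => k)
      = PySem.List.pyRange (-(C - 1)) R 1 := by
  apply PySem.List.sorted_eq_of_perm_of_pairwise_lt
  · apply List.perm_of_nodup_nodup_toFinset_eq
    · exact PySem.List.nodup_pyRange_one _ _
    · exact PySem.Set.nodup_ofList _
    · ext k
      simp only [List.mem_toFinset, PySem.List.mem_pyRange_one, PySem.Set.mem_ofList,
        pv_mem_fst_pairs]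
      omega
  · exact PySem.List.pairwise_lt_pyRange_one _ _

-- filtering a range of ints for a single value
lemma pv_filter_pyRange_single (x : Int) : ∀ (n : Nat) (a b : Int), (b - a).toNat = n →
    (PySem.List.pyRange a b 1).filter (fun c => c == x) = if a ≤ x ∧ x < b then [x] else []
  | 0, a, b, h => by
    rw [PySem.List.pyRange_one_eq_nil (by omega)]
    rw [List.filter_nil, if_neg (by omega)]
  | (n + 1), a, b, h => by
    rw [PySem.List.pyRange_one_cons (show a < b by omega), List.filter_cons]
    rw [pv_filter_pyRange_single x n (a + 1) b (by omega)]
    by_cases hx : a = x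
    · subst hx
      simp only [beq_self_eq_true, if_true]
      rw [if_neg (by omega), if_pos ⟨le_refl _, by omega⟩]
    · have hb : ((a == x) : Bool) = false := by simp [hx]
      rw [hb]
      simp only [Bool.false_eq_true, if_false]
      split_ifs <;> first | rfl | omega

-- the sum A computes for one key equals B's direct diagonal sum
lemma pv_diag_sum (matrix : List (List Int)) (R C k : Int) (hR : 0 < R) (hC : 0 < C)
    (hk1 : -(C - 1) ≤ k) (hk2 : k < R) :
    (((pvPairs matrix R C).filter (fun p => p.1 == k)).map (fun p => p.2)).sum
      = ((PySem.List.pyRange (max 0 k) (min R (k + C)) 1).map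
          (fun row => pvVal matrix row (row - k))).sum := by
  unfold pvPairs
  rw [List.filter_flatMap]
  have hrow : ∀ row : Int,
      (((PySem.List.pyRange 0 C 1).map (fun col => (row - col, pvVal matrix row col))).filter
          (fun p => p.1 == k))
        = if 0 ≤ row - k ∧ row - k < C then [(k, pvVal matrix row (row - k))] else [] := by
    intro row
    rw [List.filter_map]
    have hcg : ((PySem.List.pyRange 0 C 1).filter
        ((fun p => p.1 == k) ∘ fun col => (row - col, pvVal matrix row col)))
        = (PySem.List.pyRange 0 C 1).filter (fun c => c == row - k) := by
      apply List.filter_congr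
      intro col _
      show ((row - col == k) : Bool) = (col == row - k)
      by_cases h : row - col = k
      · have h2 : col = row - k := by omega
        simp [h2]
      · have h2 : col ≠ row - k := by omega
        simp [h2]
        exact h
    rw [hcg, pv_filter_pyRange_single (row - k) (C - 0).toNat 0 C (by omega)]
    split_ifs with h1
    · have e : row - (row - k) = k := by omega
      simp [e]
    · rfl
  rw [List.map_flatMap]
  simp only [hrow]
  have hterm : ∀ row : Int,
      ((if 0 ≤ row - k ∧ row - k < C then [(k, pvVal matrix row (row - k))] else []).map
        (fun p => p.2))
      = if 0 ≤ row - k ∧ row - k < C then [pvVal matrix row (row - k)] else [] := by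
    intro row
    split_ifs <;> rfl
  simp only [hterm]
  have hfm : ∀ (l : List Int) (f : Int → List Int),
      (l.flatMap f).sum = (l.map (fun a => (f a).sum)).sum := by
    intro l f
    induction l with
    | nil => rfl
    | cons x t ih => simp [List.flatMap_cons, ih]
  rw [hfm]
  have hsum : ∀ row : Int,
      (if 0 ≤ row - k ∧ row - k < C then [pvVal matrix row (row - k)] else []).sum
      = if 0 ≤ row - k ∧ row - k < C then pvVal matrix row (row - k) else 0 := by
    intro row
    split_ifs <;> simp
  simp only [hsum]
  rw [PySem.List.pyRange_one_append 0 (max 0 k) R (by omega) (by omega)]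
  rw [PySem.List.pyRange_one_append (max 0 k) (min R (k + C)) R (by omega) (by omega)]
  rw [List.map_append, List.map_append, List.sum_append, List.sum_append]
  have h1 : ((PySem.List.pyRange 0 (max 0 k) 1).map
      (fun row => if 0 ≤ row - k ∧ row - k < C then pvVal matrix row (row - k) else 0)).sum = 0 := by
    apply List.sum_eq_zero
    intro x hx
    obtain ⟨row, hrow', rfl⟩ := List.mem_map.mp hx
    rw [PySem.List.mem_pyRange_one] at hrow'
    rw [if_neg (by omega)]
  have h3 : ((PySem.List.pyRange (min R (k + C)) R 1).map
      (fun row => if 0 ≤ row - k ∧ row - k < C then pvVal matrix row (row - k) else 0)).sum = 0 := by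
    apply List.sum_eq_zero
    intro x hx
    obtain ⟨row, hrow', rfl⟩ := List.mem_map.mp hx
    rw [PySem.List.mem_pyRange_one] at hrow'
    rw [if_neg (by omega)]
  rw [h1, h3]
  have h2 : ((PySem.List.pyRange (max 0 k) (min R (k + C)) 1).map
      (fun row => if 0 ≤ row - k ∧ row - k < C then pvVal matrix row (row - k) else 0))
      = ((PySem.List.pyRange (max 0 k) (min R (k + C)) 1).map
          (fun row => pvVal matrix row (row - k))) := by
    apply List.map_congr_left
    intro row hrow'
    rw [PySem.List.mem_pyRange_one] at hrow'
    rw [if_pos (by omega)]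
  rw [h2]
  ring

-- ===== VERDICT (by name: the statement is the Claim_ definition above) =====
theorem get_left_diagonals_spec : Claim_equal_get_left_diagonals := by
  intro matrix _ _
  unfold Spec_get_left_diagonals get_left_diagonals get_left_diagonals_alt
  by_cases hnil : matrix = []
  · subst hnil; rfl
  have hR : (0 : Int) < PySem.List.len matrix := by
    cases matrix with
    | nil => exact absurd rfl hnil
    | cons a t => simp [PySem.List.len_eq]
  simp only []
  rw [if_pos hR]
  by_cases hC0 : PySem.List.len (PySem.List.pyGetD matrix 0 []) = 0
  · rw [if_pos (Or.inr hC0)]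
    have hnilr : PySem.List.pyRange 0 0 1 = [] := PySem.List.pyRange_one_eq_nil (le_refl 0)
    simp only [hC0, hnilr, List.foldl_nil, List.foldl_fixed]
    rw [PySem.Dict.keys_empty]
    rfl
  · have hC : (0 : Int) < PySem.List.len (PySem.List.pyGetD matrix 0 []) := by
      have := PySem.List.len_eq (PySem.List.pyGetD matrix 0 [])
      omega
    rw [if_neg (by omega)]
    rw [pv_dictA_eq matrix (PySem.List.len matrix) (PySem.List.len (PySem.List.pyGetD matrix 0 []))]
    rw [pv_keys_canon, pv_sorted_keys matrix _ _ hR hC]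
    rw [PySem.List.foldl_append_singleton_eq_map]
    rw [List.nil_append]
    apply List.map_congr_left
    intro k hk
    rw [PySem.List.mem_pyRange_one] at hk
    rw [pv_getD_canon]
    rw [pv_diag_sum matrix _ _ k hR hC (by omega) (by omega)]
    rw [PySem.List.foldl_add]
    rw [zero_add]
    simp [pvVal]
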